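-- pv_equiv track=rewrite | github.com/MatheusEduard/ProjetoMusica | MusicBoom/escala_menor_harmonica.py | escala_menor_harmonica
-- ===== SOURCE A (Python) =====
-- def escala_menor_harmonica(nota):
--     notas = ['C','C#','D','D#','E','F','F#','G','G#','A','A#','B','C','C#','D','D#','E','F','F#','G','G#','A','A#','B','C','C#','D','D#','E','F','F#','G','G#','A','A#','B','C']
--     escala = []
--     for i in range(len(notas)-25):
--         if notas[i] == nota:
--             atual = notas[i]
--             escala.append(atual)
--             atual = notas[i+2]
--             escala.append(atual)
--             atual = notas[i+3]
--             escala.append(atual)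
--             atual = notas[i+5]
--             escala.append(atual)
--             atual = notas[i+7]
--             escala.append(atual)
--             atual = notas[i+8]
--             escala.append(atual)
--             atual = notas[i+11]
--             escala.append(atual)
--             atual = notas[i+12]
--             escala.append(atual)
--             atual = notas[i+14]
--             escala.append(atual)
--             atual = notas[i+15]
--             escala.append(atual)
--             atual = notas[i+17]
--             escala.append(atual)
--             atual = notas[i+19]
--             escala.append(atual)
--             atual = notas[i+20]
--             escala.append(atual)
--             atual = notas[i+23]
--             escala.append(atual)
--             atual = notas[i+24]
--             escala.append(atual)
--
--     return escala
-- ===== SOURCE B (Python) =====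
-- _CHROM = ['C', 'C#', 'D', 'D#', 'E', 'F', 'F#', 'G', 'G#', 'A', 'A#', 'B']
-- # harmonic-minor interval cycle, two octaves (14 steps -> 15 notes)
-- _STEPS = [2, 1, 2, 2, 1, 3, 1, 2, 1, 2, 2, 1, 3, 1]
--
--
-- def escala_menor_harmonica(nota):
--     if nota not in _CHROM:
--         return []
--     p = _CHROM.index(nota)
--     escala = [_CHROM[p % 12]]
--     for passo in _STEPS:
--         p += passo
--         escala.append(_CHROM[p % 12])
--     return escala
-- ===== Notes on version B (the rewrite author's own statement) =====
-- stated objective: simpler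
-- what changed: B replaces A's scan of a 37-element triple-duplicated note table with 15 unrolled fixed-offset reads by an index lookup in the 12-note chromatic list followed by a running semitone accumulator stepped through the harmonic-minor interval cycle, reading each note modulo 12.
import Mathlib
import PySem

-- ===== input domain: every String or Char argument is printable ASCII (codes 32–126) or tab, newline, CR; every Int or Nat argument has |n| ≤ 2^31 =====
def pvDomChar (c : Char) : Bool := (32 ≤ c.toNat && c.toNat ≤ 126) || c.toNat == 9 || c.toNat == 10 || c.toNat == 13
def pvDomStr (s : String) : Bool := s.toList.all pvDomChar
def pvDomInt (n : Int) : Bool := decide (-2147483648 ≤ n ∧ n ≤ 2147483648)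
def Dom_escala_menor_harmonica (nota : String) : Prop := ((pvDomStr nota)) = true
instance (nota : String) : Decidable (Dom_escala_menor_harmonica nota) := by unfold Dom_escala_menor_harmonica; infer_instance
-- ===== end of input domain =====

-- B builds the scale with a running semitone accumulator over the harmonic-minor
-- interval cycle instead of A's 15 fixed reads from a triple-duplicated table (objective: simpler).

-- ===== PORT A =====
def pvNotasA : List String :=
  ["C","C#","D","D#","E","F","F#","G","G#","A","A#","B",
   "C","C#","D","D#","E","F","F#","G","G#","A","A#","B",
   "C","C#","D","D#","E","F","F#","G","G#","A","A#","B","C"]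

def escala_menor_harmonica (nota : String) : List String :=
  (PySem.List.pyRange 0 (PySem.List.len pvNotasA - 25) 1).foldl
    (fun escala i =>
      if PySem.List.pyGetD pvNotasA i "" == nota then
        escala ++ [PySem.List.pyGetD pvNotasA i ""]
               ++ [PySem.List.pyGetD pvNotasA (i+2) ""]
               ++ [PySem.List.pyGetD pvNotasA (i+3) ""]
               ++ [PySem.List.pyGetD pvNotasA (i+5) ""]
               ++ [PySem.List.pyGetD pvNotasA (i+7) ""]
               ++ [PySem.List.pyGetD pvNotasA (i+8) ""]
               ++ [PySem.List.pyGetD pvNotasA (i+11) ""]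
               ++ [PySem.List.pyGetD pvNotasA (i+12) ""]
               ++ [PySem.List.pyGetD pvNotasA (i+14) ""]
               ++ [PySem.List.pyGetD pvNotasA (i+15) ""]
               ++ [PySem.List.pyGetD pvNotasA (i+17) ""]
               ++ [PySem.List.pyGetD pvNotasA (i+19) ""]
               ++ [PySem.List.pyGetD pvNotasA (i+20) ""]
               ++ [PySem.List.pyGetD pvNotasA (i+23) ""]
               ++ [PySem.List.pyGetD pvNotasA (i+24) ""]
      else escala) []

-- ===== PORT B =====
def pvChrom : List String :=
  ["C","C#","D","D#","E","F","F#","G","G#","A","A#","B"]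

def pvSteps : List Int := [2,1,2,2,1,3,1,2,1,2,2,1,3,1]

def escala_menor_harmonica_alt (nota : String) : List String :=
  match PySem.List.index? pvChrom nota with
  | none => []
  | some p0 =>
    let p : Int := (p0 : Int)
    (pvSteps.foldl
      (fun (s : Int × List String) passo =>
        (s.1 + passo,
         s.2 ++ [PySem.List.pyGetD pvChrom (PySem.Int.mod (s.1 + passo) 12) ""]))
      (p, [PySem.List.pyGetD pvChrom (PySem.Int.mod p 12) ""])).2

-- ===== PRECONDITION & SPEC =====
def Spec_escala_menor_harmonica (nota : String) (out : List String) : Prop := out = escala_menor_harmonica_alt nota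
instance (nota : String) (out : List String) : Decidable (Spec_escala_menor_harmonica nota out) := by unfold Spec_escala_menor_harmonica; infer_instance

-- ===== CLAIM (what is proved, stated in full; the proofs are below) =====
def Claim_equal_escala_menor_harmonica : Prop := ∀ (nota : String), Dom_escala_menor_harmonica nota → Spec_escala_menor_harmonica nota (escala_menor_harmonica nota)

-- ===== LEMMAS AND PROOFS =====

-- A fold that skips every element leaves its accumulator unchanged.
lemma foldl_skip {α β : Type} (l : List β) (init : α) (c : β → Bool) (f : α → β → α)
    (h : ∀ i ∈ l, c i = false) :
    l.foldl (fun acc i => if c i then f acc i else acc) init = init := by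
  induction l generalizing init with
  | nil => rfl
  | cons x xs ih =>
    have hx := h x (List.mem_cons_self)
    simp [List.foldl_cons, hx]
    exact ih init (fun i hi => h i (List.mem_cons_of_mem _ hi))

-- Both programs return [] when nota is not one of the 12 chromatic note names.
lemma escala_not_mem (nota : String) (h : nota ∉ pvChrom) :
    escala_menor_harmonica nota = [] ∧ escala_menor_harmonica_alt nota = [] := by
  simp [pvChrom, List.mem_cons] at h
  obtain ⟨h1,h2,h3,h4,h5,h6,h7,h8,h9,h10,h11,h12⟩ := h
  constructor
  · have e : PySem.List.pyRange 0 (PySem.List.len pvNotasA - 25) 1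
        = [0,1,2,3,4,5,6,7,8,9,10,11] := by decide
    have hall : ∀ i ∈ PySem.List.pyRange 0 (PySem.List.len pvNotasA - 25) 1,
        (PySem.List.pyGetD pvNotasA i "" == nota) = false := by
      rw [e]
      intro i hi
      simp only [List.mem_cons, List.not_mem_nil, or_false] at hi
      rcases hi with rfl|rfl|rfl|rfl|rfl|rfl|rfl|rfl|rfl|rfl|rfl|rfl <;>
        first
          | (rw [show PySem.List.pyGetD pvNotasA 0 "" = "C" from by decide]; simp [Ne.symm h1])
          | (rw [show PySem.List.pyGetD pvNotasA 1 "" = "C#" from by decide]; simp [Ne.symm h2])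
          | (rw [show PySem.List.pyGetD pvNotasA 2 "" = "D" from by decide]; simp [Ne.symm h3])
          | (rw [show PySem.List.pyGetD pvNotasA 3 "" = "D#" from by decide]; simp [Ne.symm h4])
          | (rw [show PySem.List.pyGetD pvNotasA 4 "" = "E" from by decide]; simp [Ne.symm h5])
          | (rw [show PySem.List.pyGetD pvNotasA 5 "" = "F" from by decide]; simp [Ne.symm h6])
          | (rw [show PySem.List.pyGetD pvNotasA 6 "" = "F#" from by decide]; simp [Ne.symm h7])
          | (rw [show PySem.List.pyGetD pvNotasA 7 "" = "G" from by decide]; simp [Ne.symm h8])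
          | (rw [show PySem.List.pyGetD pvNotasA 8 "" = "G#" from by decide]; simp [Ne.symm h9])
          | (rw [show PySem.List.pyGetD pvNotasA 9 "" = "A" from by decide]; simp [Ne.symm h10])
          | (rw [show PySem.List.pyGetD pvNotasA 10 "" = "A#" from by decide]; simp [Ne.symm h11])
          | (rw [show PySem.List.pyGetD pvNotasA 11 "" = "B" from by decide]; simp [Ne.symm h12])
    exact foldl_skip _ _ _ _ hall
  · have e : PySem.List.index? pvChrom nota = none := by
      rw [PySem.List.index?_eq_none_iff]
      simp [pvChrom, List.mem_cons, h1,h2,h3,h4,h5,h6,h7,h8,h9,h10,h11,h12]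
    simp only [escala_menor_harmonica_alt]
    rw [e]

-- ===== VERDICT (by name: the statement is the Claim_ definition above) =====
theorem escala_menor_harmonica_spec : Claim_equal_escala_menor_harmonica := by
  intro nota _
  unfold Spec_escala_menor_harmonica
  by_cases h : nota ∈ pvChrom
  · simp [pvChrom, List.mem_cons] at h
    rcases h with h|h|h|h|h|h|h|h|h|h|h|h <;> subst h <;> decide
  · obtain ⟨ha, hb⟩ := escala_not_mem nota h
    rw [ha, hb]
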